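-- pv_equiv track=rewrite | github.com/MattMichaud/AoC | 2023/code/01.py | calibration_values_sum
-- ===== SOURCE A (Python) =====
-- def find_first(text, patterns):
--     for i in range(len(text)):
--         for p in patterns:
--             if text[i : i + len(p[0])] == p[0]:
--                 return p[1]
--
-- def calibration_values_sum(inp, part2=False):
--     search_for = [(str(c), int(c)) for c in range(10)]
--     if part2:
--         search_for += [
--             ("one", 1),
--             ("two", 2),
--             ("three", 3),
--             ("four", 4),
--             ("five", 5),
--             ("six", 6),
--             ("seven", 7),
--             ("eight", 8),
--             ("nine", 9),
--         ]
--     search_for_reversed = [(p[0][::-1], p[1]) for p in search_for]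
--     return sum(
--         [
--             find_first(line, search_for) * 10
--             + find_first(line[::-1], search_for_reversed)
--             for line in inp
--         ]
--     )
-- ===== SOURCE B (Python) =====
-- WORDS = ["one", "two", "three", "four", "five", "six", "seven", "eight", "nine"]
--
-- def calibration_values_sum(inp, part2=False):
--     pats = [(str(d), d) for d in range(10)]
--     if part2:
--         pats += [(w, k) for k, w in enumerate(WORDS, 1)]
--     total = 0
--     for line in inp:
--         first = None
--         last = None
--         for i in range(len(line)):
--             if first is None:
--                 for s, v in pats:
--                     if line[i : i + len(s)] == s:
--                         first = v
--                         break
--             for s, v in pats: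
--                 L = len(s)
--                 if L <= i + 1 and line[i + 1 - L : i + 1] == s:
--                     last = v
--                     break
--         total += first * 10 + last
--     return total
-- ===== Notes on version B (the rewrite author's own statement) =====
-- stated objective: alternative
-- what changed: Replaces A's two scans (forward scan of the line plus a second scan of the reversed line with a reversed pattern table) by a single forward pass over the original line that collects the first start-anchored and the last end-anchored pattern match; no reversed strings or reversed patterns are built.
import Mathlib
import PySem

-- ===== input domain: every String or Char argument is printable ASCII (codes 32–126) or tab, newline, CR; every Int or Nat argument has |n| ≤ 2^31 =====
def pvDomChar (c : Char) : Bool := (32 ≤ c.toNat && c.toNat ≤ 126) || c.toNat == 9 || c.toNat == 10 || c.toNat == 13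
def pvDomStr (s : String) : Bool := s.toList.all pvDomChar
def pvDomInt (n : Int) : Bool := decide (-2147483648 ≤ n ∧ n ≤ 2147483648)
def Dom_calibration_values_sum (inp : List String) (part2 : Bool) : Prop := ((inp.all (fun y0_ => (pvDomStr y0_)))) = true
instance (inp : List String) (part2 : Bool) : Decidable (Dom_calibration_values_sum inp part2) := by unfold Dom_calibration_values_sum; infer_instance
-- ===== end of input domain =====

-- B replaces A's two scans (forward string, then reversed string with reversed patterns) by ONE forward
-- pass over the original line collecting the first start-anchored and the last end-anchored pattern match
-- (objective: alternative decomposition, no speed claim). Equivalence of the RETURN value on Pre_.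

-- ===== PORT A =====
-- strings are ported as List Char (Python slice/== on str = take/drop/= on the char list; slices clamp,
-- and a clamped shorter slice can never equal a longer pattern, so `take` is exact here)
-- find_first's inner loop `for p in patterns: if text[i:i+len(p[0])] == p[0]: return p[1]`
def pvFirstPat (t : List Char) : List (List Char × Int) → Option Int
  | [] => none
  | (p, v) :: ps => if t.take p.length = p then some v else pvFirstPat t ps

-- find_first's outer loop `for i in range(len(text))`: structural recursion over the suffixes of text
-- (text[i:i+L] == p  ⟺  p is a take-prefix of the suffix starting at i)
def pvFindFirst : List Char → List (List Char × Int) → Option Int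
  | [], _ => none
  | c :: rest, pats =>
      match pvFirstPat (c :: rest) pats with
      | some v => some v
      | none => pvFindFirst rest pats

-- search_for = [(str(c), int(c)) for c in range(10)] (+ the nine word pairs when part2)
def pvSearchFor (part2 : Bool) : List (List Char × Int) :=
  ((PySem.List.pyRange 0 10 1).map (fun c => (PySem.Int.toChars c, c))) ++
  (if part2 then
    [(['o','n','e'], 1), (['t','w','o'], 2), (['t','h','r','e','e'], 3), (['f','o','u','r'], 4),
     (['f','i','v','e'], 5), (['s','i','x'], 6), (['s','e','v','e','n'], 7),
     (['e','i','g','h','t'], 8), (['n','i','n','e'], 9)]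
   else [])

def calibration_values_sum (inp : List String) (part2 : Bool) : Int :=
  let searchFor := pvSearchFor part2
  -- search_for_reversed = [(p[0][::-1], p[1]) for p in search_for]  (s[::-1] = reverse)
  let searchForReversed := searchFor.map (fun p => (p.1.reverse, p.2))
  -- sum([find_first(line, sf) * 10 + find_first(line[::-1], sfr) for line in inp])
  -- on a line with no match Python computes None * 10 and raises TypeError: Pre_ excludes those
  -- inputs, so the `0` arm is never reached on the claimed domain
  (inp.map (fun line =>
    match pvFindFirst line.toList searchFor, pvFindFirst line.toList.reverse searchForReversed with
    | some a, some b => a * 10 + b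
    | _, _ => 0)).sum

-- ===== PORT B =====
-- inner `for s, v in pats: if line[i:i+len(s)] == s: first = v; break`
def pvMatchStart (cs : List Char) (i : Nat) : List (List Char × Int) → Option Int
  | [] => none
  | (s, v) :: ps => if (cs.drop i).take s.length = s then some v else pvMatchStart cs i ps

-- inner `for s, v in pats: if len(s) <= i+1 and line[i+1-len(s):i+1] == s: last = v; break`
def pvMatchEnd (cs : List Char) (i : Nat) : List (List Char × Int) → Option Int
  | [] => none
  | (s, v) :: ps =>
      if s.length ≤ i + 1 ∧ (cs.take (i + 1)).drop (i + 1 - s.length) = s then some v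
      else pvMatchEnd cs i ps

-- pats = [(str(d), d) for d in range(10)] (+ [(w, k) for k, w in enumerate(WORDS, 1)] when part2)
def pvWordsB : List (List Char) :=
  [['o','n','e'], ['t','w','o'], ['t','h','r','e','e'], ['f','o','u','r'], ['f','i','v','e'],
   ['s','i','x'], ['s','e','v','e','n'], ['e','i','g','h','t'], ['n','i','n','e']]

def pvPatsB (part2 : Bool) : List (List Char × Int) :=
  ((PySem.List.pyRange 0 10 1).map (fun d => (PySem.Int.toChars d, d))) ++
  (if part2 then (pvWordsB.zip (List.range 9)).map (fun wk => (wk.1, (wk.2 : Int) + 1)) else [])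

def calibration_values_sum_alt (inp : List String) (part2 : Bool) : Int :=
  let pats := pvPatsB part2
  inp.foldl (fun total line =>
    let cs := line.toList
    -- for i in range(len(line)): if first is None: first = <start match at i>; last = <end match at i> or last
    let st := (List.range cs.length).foldl
      (fun (st : Option Int × Option Int) i =>
        ((if st.1.isNone then pvMatchStart cs i pats else st.1),
         ((pvMatchEnd cs i pats).or st.2)))
      (none, none)
    -- first * 10 + last; on a no-match line Python raises TypeError (None * 10): excluded by Pre_
    total +
      (match st.1 with
       | some a => (match st.2 with | some b => a * 10 + b | none => 0)
       | none => 0)) 0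

-- ===== PRECONDITION & SPEC =====
def pvWordStrs : List String :=
  ["one", "two", "three", "four", "five", "six", "seven", "eight", "nine"]

-- Pre_ excludes exactly the inputs where Python A raises TypeError (a line containing neither a digit
-- nor, in part2, a spelled digit word: find_first returns None and None * 10 raises); B raises there too.
def Pre_calibration_values_sum (inp : List String) (part2 : Bool) : Prop :=
  ∀ line ∈ inp, (line.toList.any Char.isDigit = true) ∨
    (part2 = true ∧ ∃ w ∈ pvWordStrs, w.toList <:+: line.toList)
instance (inp : List String) (part2 : Bool) : Decidable (Pre_calibration_values_sum inp part2) := by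
  unfold Pre_calibration_values_sum; infer_instance

def pvWitness_calibration_values_sum : List String × Bool := (["a1b2", "xtwoy"], true)

def Spec_calibration_values_sum (inp : List String) (part2 : Bool) (out : Int) : Prop := out = calibration_values_sum_alt inp part2
instance (inp : List String) (part2 : Bool) (out : Int) : Decidable (Spec_calibration_values_sum inp part2 out) := by unfold Spec_calibration_values_sum; infer_instance

-- ===== CLAIM (what is proved, stated in full; the proofs are below) =====
def Claim_equal_calibration_values_sum : Prop := ∀ (inp : List String) (part2 : Bool), Dom_calibration_values_sum inp part2 → Pre_calibration_values_sum inp part2 → Spec_calibration_values_sum inp part2 (calibration_values_sum inp part2)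

-- ===== LEMMAS AND PROOFS =====

-- the two ports build the same pattern table
theorem patsB_eq (part2 : Bool) : pvPatsB part2 = pvSearchFor part2 := by
  cases part2 <;> decide

theorem matchStart_eq_firstPat (cs : List Char) (i : Nat) (pats : List (List Char × Int)) :
    pvMatchStart cs i pats = pvFirstPat (cs.drop i) pats := by
  induction pats with
  | nil => rfl
  | cons p ps ih => simp [pvMatchStart, pvFirstPat, ih]

theorem foldl_pair {α : Type} (f g : Option Int → α → Option Int) (l : List α)
    (a b : Option Int) :
    l.foldl (fun st i => (f st.1 i, g st.2 i)) (a, b) = (l.foldl f a, l.foldl g b) := by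
  induction l generalizing a b with
  | nil => rfl
  | cons x xs ih => simp [List.foldl, ih]

theorem first_fold_some (h : Nat → Option Int) (l : List Nat) (v : Int) :
    l.foldl (fun a i => if a.isNone then h i else a) (some v) = some v := by
  induction l with
  | nil => rfl
  | cons x xs ih => simpa [List.foldl] using ih

-- B's "first" fold over the indices equals A's find_first on the same text
theorem first_fold_eq_findFirst (pats : List (List Char × Int)) :
    ∀ cs : List Char,
      (List.range cs.length).foldl
        (fun a i => if a.isNone then pvMatchStart cs i pats else a) none
      = pvFindFirst cs pats := by
  intro cs
  induction cs with
  | nil => rfl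
  | cons c rest ih =>
    rw [List.length_cons, List.range_succ_eq_map]
    simp only [List.foldl_cons, List.foldl_map, Option.isNone_none, if_true]
    rw [matchStart_eq_firstPat, List.drop_zero]
    cases h : pvFirstPat (c :: rest) pats with
    | some v =>
      rw [first_fold_some]
      simp [pvFindFirst, h]
    | none =>
      have hc : ∀ (a : Option Int), ∀ i ∈ List.range rest.length,
          (if a.isNone then pvMatchStart (c :: rest) i.succ pats else a)
          = (if a.isNone then pvMatchStart rest i pats else a) := by
        intro a i _
        have : pvMatchStart (c :: rest) i.succ pats = pvMatchStart rest i pats := by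
          rw [matchStart_eq_firstPat, matchStart_eq_firstPat]; rfl
        rw [this]
      rw [PySem.List.foldl_congr_mem _ _ _ _ hc, ih]
      simp [pvFindFirst, h]

-- a fold that keeps the LAST some equals the first-some fold over the reversed index list
theorem last_fold_eq (h : Nat → Option Int) (l : List Nat) (a : Option Int) :
    l.foldl (fun acc i => (h i).or acc) a
    = (l.reverse.foldl (fun acc i => if acc.isNone then h i else acc) none).or a := by
  induction l generalizing a with
  | nil => rfl
  | cons x xs ih =>
    rw [List.foldl_cons, ih, List.reverse_cons, List.foldl_append, List.foldl_cons,
      List.foldl_nil]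
    cases hF : xs.reverse.foldl (fun acc i => if acc.isNone then h i else acc) none with
    | some v => rfl
    | none => cases h x <;> rfl

-- the slice correspondence: a reversed pattern matching at position j of the reversed text
-- is the pattern matching END-anchored at position (n-1-j) of the text
theorem take_drop_reverse (cs p : List Char) (j : Nat) (hj : j < cs.length) :
    ((cs.reverse.drop j).take p.length = p.reverse)
    ↔ (p.length ≤ cs.length - j ∧ (cs.take (cs.length - j)).drop (cs.length - j - p.length) = p) := by
  rw [List.drop_reverse]
  set u := cs.take (cs.length - j) with hu
  have hul : u.length = cs.length - j := by
    rw [hu, List.length_take]; omega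
  by_cases hL : p.length ≤ cs.length - j
  · have : u.reverse.take p.length = (u.drop (u.length - p.length)).reverse := by
      rw [List.take_reverse]
    rw [this, hul]
    constructor
    · intro h; exact ⟨hL, List.reverse_injective h⟩
    · intro h; rw [h.2]
  · have hshort : u.reverse.take p.length = u.reverse := by
      apply List.take_of_length_le; rw [List.length_reverse, hul]; omega
    rw [hshort]
    constructor
    · intro h
      have := congrArg List.length h
      rw [List.length_reverse, List.length_reverse, hul] at this
      omega
    · intro h; omega

theorem firstPat_rev (pats : List (List Char × Int)) (cs : List Char) (j : Nat)
    (hj : j < cs.length) :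
    pvFirstPat (cs.reverse.drop j) (pats.map (fun p => (p.1.reverse, p.2)))
    = pvMatchEnd cs (cs.length - 1 - j) pats := by
  induction pats with
  | nil => rfl
  | cons p ps ih =>
    simp only [List.map_cons, pvFirstPat, pvMatchEnd]
    have hi1 : cs.length - 1 - j + 1 = cs.length - j := by omega
    rw [List.length_reverse, hi1]
    by_cases hcond : (cs.reverse.drop j).take p.1.length = p.1.reverse
    · rw [if_pos hcond, if_pos ((take_drop_reverse cs p.1 j hj).mp hcond)]
    · rw [if_neg hcond, if_neg (fun h => hcond ((take_drop_reverse cs p.1 j hj).mpr h)), ih]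

-- B's "last" fold over the indices equals A's find_first on the reversed text with reversed patterns
theorem last_fold_eq_findFirst_rev (pats : List (List Char × Int)) (cs : List Char) :
    (List.range cs.length).foldl
      (fun a i => (pvMatchEnd cs i pats).or a) none
    = pvFindFirst cs.reverse (pats.map (fun p => (p.1.reverse, p.2))) := by
  rw [last_fold_eq, Option.or_none]
  have h1 : pvFindFirst cs.reverse (pats.map (fun p => (p.1.reverse, p.2)))
      = (List.range cs.reverse.length).foldl
          (fun a j => if a.isNone then pvMatchStart cs.reverse j (pats.map (fun p => (p.1.reverse, p.2))) else a) none := by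
    rw [first_fold_eq_findFirst]
  rw [h1, List.length_reverse]
  rw [show (List.range cs.length).reverse = (List.range cs.length).map (fun i => cs.length - 1 - i) by
    rw [List.range_eq_range', List.reverse_range']; simp [List.range_eq_range']]
  rw [List.foldl_map]
  apply PySem.List.foldl_congr_mem
  intro a i hi
  rw [List.mem_range] at hi
  congr 1
  rw [matchStart_eq_firstPat, firstPat_rev pats cs i hi]

-- per line, the two ports compute the same term
theorem line_eq (part2 : Bool) (line : String) :
    (match pvFindFirst line.toList (pvSearchFor part2),
           pvFindFirst line.toList.reverse ((pvSearchFor part2).map (fun p => (p.1.reverse, p.2))) with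
     | some a, some b => a * 10 + b
     | _, _ => (0 : Int))
    = (let cs := line.toList
       let st := (List.range cs.length).foldl
         (fun (st : Option Int × Option Int) i =>
           ((if st.1.isNone then pvMatchStart cs i (pvPatsB part2) else st.1),
            ((pvMatchEnd cs i (pvPatsB part2)).or st.2)))
         (none, none)
       match st.1 with
       | some a => (match st.2 with | some b => a * 10 + b | none => 0)
       | none => (0 : Int)) := by
  simp only [patsB_eq]
  rw [foldl_pair (fun a i => if a.isNone then pvMatchStart line.toList i (pvSearchFor part2) else a)
        (fun a i => (pvMatchEnd line.toList i (pvSearchFor part2)).or a)]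
  rw [first_fold_eq_findFirst, last_fold_eq_findFirst_rev]
  cases pvFindFirst line.toList (pvSearchFor part2) <;>
    cases pvFindFirst line.toList.reverse ((pvSearchFor part2).map fun p => (p.1.reverse, p.2)) <;> rfl

theorem sum_map_eq_foldl (g : String → Int) (inp : List String) :
    (inp.map g).sum = inp.foldl (fun total line => total + g line) 0 := by
  induction inp with
  | nil => rfl
  | cons x xs ih =>
    simp only [List.map_cons, List.sum_cons, List.foldl_cons]
    rw [ih]
    have : ∀ (a b : Int) (l : List String),
        l.foldl (fun total line => total + g line) (a + b) =
        a + l.foldl (fun total line => total + g line) b := by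
      intro a b l
      induction l generalizing b with
      | nil => rfl
      | cons y ys ihy => simp only [List.foldl_cons]; rw [add_assoc, ihy]
    simpa using (this (g x) 0 xs).symm

-- ===== VERDICT (by name: the statement is the Claim_ definition above) =====
theorem calibration_values_sum_spec : Claim_equal_calibration_values_sum := by
  intro inp part2 _ _
  unfold Spec_calibration_values_sum calibration_values_sum calibration_values_sum_alt
  rw [sum_map_eq_foldl]
  apply PySem.List.foldl_congr_mem
  intro acc line _
  rw [line_eq part2 line]
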